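-- pv_equiv track=rewrite | github.com/lilPlumberBoy/SubagentWorkforce | company_orchestrator/reports.py | classify_release_failure_capability
-- ===== SOURCE A (Python) =====
-- def classify_release_failure_capability(block: str, paths: list[str]) -> str | None:
--     if any(path.startswith("apps/todo/frontend/") for path in paths):
--         return "frontend"
--     if any(path.startswith("apps/todo/backend/") for path in paths):
--         return "backend"
--     if any(path.startswith("apps/todo/runtime/") for path in paths):
--         return "middleware"
--     return None
-- ===== SOURCE B (Python) =====
-- _PREFIX_TABLE = [
--     ("apps/todo/frontend/", "frontend"),
--     ("apps/todo/backend/", "backend"),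
--     ("apps/todo/runtime/", "middleware"),
-- ]
--
--
-- def classify_release_failure_capability(block: str, paths: list[str]) -> str | None:
--     # Data-driven: rank each path by the first table prefix it matches and
--     # keep the running minimum rank; the table row at the final rank is the answer.
--     best = len(_PREFIX_TABLE)
--     for path in paths:
--         for i, (prefix, _name) in enumerate(_PREFIX_TABLE):
--             if i < best and path.startswith(prefix):
--                 best = i
--                 break
--     return _PREFIX_TABLE[best][1] if best < len(_PREFIX_TABLE) else None
-- ===== Notes on version B (the rewrite author's own statement) =====
-- stated objective: alternative
-- what changed: Instead of three staged any() scans with hardcoded returns, B keeps a data-driven (prefix, name) table, ranks each path by the index of the first table prefix it matches, maintains the running minimum rank in one pass, and indexes the table with the final rank.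
import Mathlib
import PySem

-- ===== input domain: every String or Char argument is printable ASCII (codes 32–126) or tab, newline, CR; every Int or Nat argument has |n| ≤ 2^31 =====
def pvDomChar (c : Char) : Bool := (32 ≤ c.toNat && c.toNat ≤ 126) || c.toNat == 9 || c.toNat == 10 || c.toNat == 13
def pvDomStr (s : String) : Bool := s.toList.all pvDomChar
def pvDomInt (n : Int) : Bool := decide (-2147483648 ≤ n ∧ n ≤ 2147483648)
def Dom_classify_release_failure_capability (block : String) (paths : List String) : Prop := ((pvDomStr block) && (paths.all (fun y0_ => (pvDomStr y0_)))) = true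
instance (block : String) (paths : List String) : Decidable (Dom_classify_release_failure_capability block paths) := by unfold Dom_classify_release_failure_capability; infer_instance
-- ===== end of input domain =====

-- B replaces A's three staged any() scans and hardcoded returns by a data-driven
-- (prefix, name) table: each path is ranked by the first table prefix it matches,
-- one pass keeps the minimum rank, and the table row at that rank is the answer
-- (alternative decomposition, same cost).


-- ===== PORT A =====
def classify_release_failure_capability (block : String) (paths : List String) : Option String :=
  if paths.any (fun path => PySem.Str.startswith path "apps/todo/frontend/") then some "frontend"
  else if paths.any (fun path => PySem.Str.startswith path "apps/todo/backend/") then some "backend"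
  else if paths.any (fun path => PySem.Str.startswith path "apps/todo/runtime/") then some "middleware"
  else none

-- ===== PORT B =====
def pvPrefixTable : List (String × String) :=
  [("apps/todo/frontend/", "frontend"), ("apps/todo/backend/", "backend"),
   ("apps/todo/runtime/", "middleware")]

-- inner 'for i, (prefix, _name) in enumerate(...)' loop with its break:
-- first index i with i < best and path startswith prefix, else best unchanged
def pvScanTable (path : String) (best : Int) : List (Int × (String × String)) → Int
  | [] => best
  | (i, row) :: rest =>
      if i < best ∧ PySem.Str.startswith path row.1 then i else pvScanTable path best rest

def classify_release_failure_capability_alt (block : String) (paths : List String) : Option String :=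
  let best := paths.foldl
    (fun best path => pvScanTable path best (PySem.List.enumerate pvPrefixTable 0))
    (pvPrefixTable.length : Int)
  if best < (pvPrefixTable.length : Int) then
    some (PySem.List.pyGetD pvPrefixTable best ("", "")).2
  else none

-- ===== PRECONDITION & SPEC =====
def Spec_classify_release_failure_capability (block : String) (paths : List String) (out : Option String) : Prop := out = classify_release_failure_capability_alt block paths
instance (block : String) (paths : List String) (out : Option String) : Decidable (Spec_classify_release_failure_capability block paths out) := by unfold Spec_classify_release_failure_capability; infer_instance

-- ===== CLAIM =====
def Claim_equal_classify_release_failure_capability : Prop := ∀ (block : String) (paths : List String), Dom_classify_release_failure_capability block paths → Spec_classify_release_failure_capability block paths (classify_release_failure_capability block paths)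

-- ===== LEMMAS AND PROOFS =====

-- the rank of a single path: index of the first table prefix it starts with, else 3
def pvRank (path : String) : Int :=
  if PySem.Str.startswith path "apps/todo/frontend/" then 0
  else if PySem.Str.startswith path "apps/todo/backend/" then 1
  else if PySem.Str.startswith path "apps/todo/runtime/" then 2
  else 3

-- the rank of a whole list, phrased through A's three scans
def pvRankList (paths : List String) : Int :=
  if paths.any (fun path => PySem.Str.startswith path "apps/todo/frontend/") then 0
  else if paths.any (fun path => PySem.Str.startswith path "apps/todo/backend/") then 1
  else if paths.any (fun path => PySem.Str.startswith path "apps/todo/runtime/") then 2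
  else 3

theorem pvRank_le (path : String) : pvRank path ≤ 3 := by
  unfold pvRank; split_ifs <;> omega

theorem pvScanTable_eq_min (path : String) (best : Int) (h : best ≤ 3) :
    pvScanTable path best (PySem.List.enumerate pvPrefixTable 0) = min best (pvRank path) := by
  simp only [pvPrefixTable, PySem.List.enumerate_cons, PySem.List.enumerate_nil,
    pvScanTable, pvRank, min_def]
  cases hF : PySem.Str.startswith path "apps/todo/frontend/" <;>
    cases hB : PySem.Str.startswith path "apps/todo/backend/" <;>
      cases hR : PySem.Str.startswith path "apps/todo/runtime/" <;>
        simp only [Bool.false_eq_true, and_false, and_true, if_false] <;>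
          split_ifs <;> omega

theorem pvRankList_cons (p : String) (ps : List String) :
    pvRankList (p :: ps) = min (pvRank p) (pvRankList ps) := by
  simp only [pvRankList, pvRank, List.any_cons]
  rcases Bool.eq_false_or_eq_true (PySem.Str.startswith p "apps/todo/frontend/") with h1 | h1 <;>
    rcases Bool.eq_false_or_eq_true (PySem.Str.startswith p "apps/todo/backend/") with h2 | h2 <;>
      rcases Bool.eq_false_or_eq_true (PySem.Str.startswith p "apps/todo/runtime/") with h3 | h3 <;>
        rcases Bool.eq_false_or_eq_true (ps.any (fun path => PySem.Str.startswith path "apps/todo/frontend/")) with h4 | h4 <;>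
          rcases Bool.eq_false_or_eq_true (ps.any (fun path => PySem.Str.startswith path "apps/todo/backend/")) with h5 | h5 <;>
            rcases Bool.eq_false_or_eq_true (ps.any (fun path => PySem.Str.startswith path "apps/todo/runtime/")) with h6 | h6 <;>
              simp only [h1, h2, h3, h4, h5, h6] <;> simp

theorem pvFold_eq_min (paths : List String) (best : Int) (h : best ≤ 3) :
    paths.foldl (fun best path => pvScanTable path best (PySem.List.enumerate pvPrefixTable 0)) best
      = min best (pvRankList paths) := by
  induction paths generalizing best with
  | nil => simp only [List.foldl_nil, pvRankList, List.any_nil, Bool.false_eq_true, if_false]; omega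
  | cons p ps ih =>
    rw [List.foldl_cons, pvScanTable_eq_min p best h,
      ih _ (le_trans (min_le_right _ _) (pvRank_le p)), pvRankList_cons]
    rw [min_assoc]

-- ===== VERDICT =====
theorem classify_release_failure_capability_spec : Claim_equal_classify_release_failure_capability := by
  intro block paths _
  unfold Spec_classify_release_failure_capability
  unfold classify_release_failure_capability classify_release_failure_capability_alt
  rw [show ((pvPrefixTable.length : Int)) = 3 from rfl, pvFold_eq_min paths 3 le_rfl]
  unfold pvRankList
  rcases Bool.eq_false_or_eq_true (paths.any (fun path => PySem.Str.startswith path "apps/todo/frontend/")) with hF | hF <;>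
    rcases Bool.eq_false_or_eq_true (paths.any (fun path => PySem.Str.startswith path "apps/todo/backend/")) with hB | hB <;>
      rcases Bool.eq_false_or_eq_true (paths.any (fun path => PySem.Str.startswith path "apps/todo/runtime/")) with hR | hR <;>
        simp only [hF, hB, hR] <;>
          norm_num [pvPrefixTable, PySem.List.pyGetD, PySem.List.pyGet?, PySem.List.pyIdx?] ; rfl
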